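-- pv_equiv track=rewrite | github.com/swemoney/adventofcode2021 | day/05/part1.py | plot_lines
-- ===== SOURCE A (Python) =====
-- def plot_lines(data):
--     grid = create_empty_grid(find_max(data), find_max(data,1))
--     for line in data:
--         if line[0][0] == line[1][0]: # matching x
--             x = line[0][0]
--             sorted_y = sorted([line[0][1], line[1][1]])
--             r = range(sorted_y[0], sorted_y[1]+1)
--             for y in r: grid[y][x] += 1
--         elif line[0][1] == line[1][1]: # matching y
--             y = line[0][1]
--             sorted_x = sorted([line[0][0], line[1][0]])
--             r = range(sorted_x[0], sorted_x[1]+1)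
--             for x in r: grid[y][x] += 1
--     return grid
--
-- def create_empty_grid(width, height):
--     return [[0 for _ in range(width+1)].copy() for _ in range(height+1)]
--
-- def find_max(data, xy=0):
--     res = 0
--     for line in data:
--         for point in line:
--             if point[xy] > res:
--                 res = point[xy]
--     return res + 1
-- ===== SOURCE B (Python) =====
-- # Sweep line with difference arrays: O(1) bookkeeping per segment (row diff arrays / column
-- # events in dicts), then one top-to-bottom sweep with a running per-column accumulator.
-- def plot_lines(data):
--     mx = 0
--     my = 0
--     for (x1, y1), (x2, y2) in data:
--         mx = max(max(mx, x1), x2)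
--         my = max(max(my, y1), y2)
--     w = mx + 2   # number of columns of the grid A builds
--     h = my + 2   # number of rows
--     rowdiff = {}  # y -> difference array along x, only for rows with horizontal segments
--     colev = {}    # y -> [(x, delta)]: vertical-segment events taking effect at row y
--     for (x1, y1), (x2, y2) in data:
--         if x1 == x2:
--             a, b = min(y1, y2), max(y1, y2)
--             colev.setdefault(a, []).append((x1, 1))
--             colev.setdefault(b + 1, []).append((x1, -1))
--         elif y1 == y2:
--             a, b = min(x1, x2), max(x1, x2)
--             d = rowdiff.setdefault(y1, [0] * (w + 1))
--             d[a] += 1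
--             d[b + 1] += -1
--     colacc = [0] * w  # running count of vertical segments covering each column
--     grid = []
--     for y in range(h):
--         for (x, delta) in colev.get(y, []):
--             colacc[x] += delta
--         rd = rowdiff.get(y)
--         if rd is None:
--             grid.append(colacc.copy())
--         else:
--             acc = 0
--             row = []
--             for x in range(w):
--                 acc = acc + rd[x]
--                 row.append(acc + colacc[x])
--             grid.append(row)
--     return grid
-- ===== Notes on version B (the rewrite author's own statement) =====
-- stated objective: faster
-- what changed: Per-cell in-place increments along every segment are replaced by O(1) difference-array updates per segment (one +1/-1 pair in a per-row/per-column structure) followed by a single prefix-sum sweep that renders the grid, removing the per-cell inner loops over each segment's length.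
-- outside the precondition, e.g. on plot_lines([((-1, 0), (0, 0))]): A returns [[1, 1], [0, 0]], B returns [[0, -1], [0, 0]]
import Mathlib
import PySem

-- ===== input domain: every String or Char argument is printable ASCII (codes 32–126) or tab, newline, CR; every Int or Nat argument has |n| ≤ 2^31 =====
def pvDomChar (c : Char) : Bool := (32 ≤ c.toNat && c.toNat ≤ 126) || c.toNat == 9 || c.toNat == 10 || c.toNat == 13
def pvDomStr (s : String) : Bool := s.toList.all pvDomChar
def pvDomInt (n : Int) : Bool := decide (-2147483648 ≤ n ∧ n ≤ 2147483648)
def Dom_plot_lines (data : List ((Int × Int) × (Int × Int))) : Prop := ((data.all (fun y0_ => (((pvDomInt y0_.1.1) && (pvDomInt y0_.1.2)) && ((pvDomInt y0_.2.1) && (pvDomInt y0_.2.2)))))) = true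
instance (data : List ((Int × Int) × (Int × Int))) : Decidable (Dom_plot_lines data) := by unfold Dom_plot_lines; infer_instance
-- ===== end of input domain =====

-- B replaces per-cell increments along each segment by difference-array updates plus one prefix-sum sweep (alternative algorithm, same result).


-- ===== PORT A =====
-- point[xy] for a pair (Python tuple indexing with xy ∈ {0,1})
def pvPointCoord (p : Int × Int) (xy : Nat) : Int := if xy = 0 then p.1 else p.2

def find_max (data : List ((Int × Int) × (Int × Int))) (xy : Nat) : Int :=
  (data.foldl (fun res line =>
    [line.1, line.2].foldl (fun res point =>
      if pvPointCoord point xy > res then pvPointCoord point xy else res) res) 0) + 1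

def create_empty_grid (width height : Int) : List (List Int) :=
  (PySem.List.pyRange 0 (height + 1) 1).map (fun _ =>
    (PySem.List.pyRange 0 (width + 1) 1).map (fun _ => (0 : Int)))

-- grid[y][x] += 1 (pyGetD/pySetD are exact under Pre_'s in-range indices)
def pvGridInc (grid : List (List Int)) (y x : Int) : List (List Int) :=
  let row := PySem.List.pyGetD grid y []
  PySem.List.pySetD grid y (PySem.List.pySetD row x (PySem.List.pyGetD row x 0 + 1))

def plot_lines (data : List ((Int × Int) × (Int × Int))) : List (List Int) :=
  data.foldl (fun grid line =>
    if line.1.1 = line.2.1 then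
      let x := line.1.1
      let sorted_y := PySem.List.sorted [line.1.2, line.2.2] (fun v => v) false
      (PySem.List.pyRange (PySem.List.pyGetD sorted_y 0 0) (PySem.List.pyGetD sorted_y 1 0 + 1) 1).foldl
        (fun grid y => pvGridInc grid y x) grid
    else if line.1.2 = line.2.2 then
      let y := line.1.2
      let sorted_x := PySem.List.sorted [line.1.1, line.2.1] (fun v => v) false
      (PySem.List.pyRange (PySem.List.pyGetD sorted_x 0 0) (PySem.List.pyGetD sorted_x 1 0 + 1) 1).foldl
        (fun grid x => pvGridInc grid y x) grid
    else grid)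
    (create_empty_grid (find_max data 0) (find_max data 1))

-- ===== PORT B =====
def plot_lines_alt (data : List ((Int × Int) × (Int × Int))) : List (List Int) :=
  let mxmy := data.foldl (fun (p : Int × Int) line =>
    (max (max p.1 line.1.1) line.2.1, max (max p.2 line.1.2) line.2.2)) (0, 0)
  let w := mxmy.1 + 2
  let h := mxmy.2 + 2
  -- rowdiff/colev dicts; setdefault(k, …) followed by in-place updates is Dict.modify
  let rc := data.foldl (fun (rc : PySem.Dict Int (List Int) × PySem.Dict Int (List (Int × Int))) line =>
    if line.1.1 = line.2.1 then
      let a := min line.1.2 line.2.2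
      let b := max line.1.2 line.2.2
      (rc.1, (rc.2.modify a [] (· ++ [(line.1.1, (1 : Int))])).modify (b + 1) []
        (· ++ [(line.1.1, (-1 : Int))]))
    else if line.1.2 = line.2.2 then
      let a := min line.1.1 line.2.1
      let b := max line.1.1 line.2.1
      (rc.1.modify line.1.2 (List.replicate (w + 1).toNat 0) (fun d =>
        let d1 := PySem.List.pySetD d a (PySem.List.pyGetD d a 0 + 1)
        PySem.List.pySetD d1 (b + 1) (PySem.List.pyGetD d1 (b + 1) 0 + (-1))), rc.2)
    else rc) (PySem.Dict.empty, PySem.Dict.empty)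
  -- sweep: running colacc plus the grid built row by row
  let res := (PySem.List.pyRange 0 h 1).foldl (fun (s : List Int × List (List Int)) y =>
    let colacc := (rc.2.getD y []).foldl (fun ca p =>
      PySem.List.pySetD ca p.1 (PySem.List.pyGetD ca p.1 0 + p.2)) s.1
    match rc.1.get? y with
    | none => (colacc, s.2 ++ [colacc])
    | some rd =>
      (colacc, s.2 ++ [((PySem.List.pyRange 0 w 1).foldl (fun (t : Int × List Int) x =>
        let acc := t.1 + PySem.List.pyGetD rd x 0
        (acc, t.2 ++ [acc + PySem.List.pyGetD colacc x 0])) ((0 : Int), ([] : List Int))).2]))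
    (List.replicate w.toNat (0 : Int), ([] : List (List Int)))
  res.2

-- ===== PRECONDITION & SPEC =====
-- Pre_ restricts coordinates of the axis-aligned (plotted) segments to the puzzle's natural
-- domain, grid positions ≥ 0: on a negative coordinate A either raises IndexError (below
-- -(grid size)) or silently plots onto the far edge of the grid through Python's
-- negative-index wraparound, an artefact of list indexing that B does not reproduce.
def Pre_plot_lines (data : List ((Int × Int) × (Int × Int))) : Prop :=
  ∀ L ∈ data,
    (L.1.1 = L.2.1 → 0 ≤ L.1.1 ∧ 0 ≤ L.2.1 ∧ 0 ≤ L.1.2 ∧ 0 ≤ L.2.2) ∧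
    (¬ L.1.1 = L.2.1 → L.1.2 = L.2.2 → 0 ≤ L.1.1 ∧ 0 ≤ L.2.1 ∧ 0 ≤ L.1.2 ∧ 0 ≤ L.2.2)
instance (data : List ((Int × Int) × (Int × Int))) : Decidable (Pre_plot_lines data) := by unfold Pre_plot_lines; infer_instance

def pvWitness_plot_lines : (List ((Int × Int) × (Int × Int))) := [((0, 1), (2, 1)), ((1, 0), (1, 2))]

def Spec_plot_lines (data : List ((Int × Int) × (Int × Int))) (out : List (List Int)) : Prop := out = plot_lines_alt data
instance (data : List ((Int × Int) × (Int × Int))) (out : List (List Int)) : Decidable (Spec_plot_lines data out) := by unfold Spec_plot_lines; infer_instance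

-- ===== CLAIM (what is proved, stated in full; the proofs are below) =====
def Claim_equal_plot_lines : Prop := ∀ (data : List ((Int × Int) × (Int × Int))), Dom_plot_lines data → Pre_plot_lines data → Spec_plot_lines data (plot_lines data)

-- ===== LEMMAS AND PROOFS =====

-- maximal x / y coordinate seen by either program (0 if none); the grid A builds has
-- pvMxX+2 columns and pvMxY+2 rows
def pvMxX (data : List ((Int × Int) × (Int × Int))) : Int :=
  data.foldl (fun r L => max (max r L.1.1) L.2.1) 0
def pvMxY (data : List ((Int × Int) × (Int × Int))) : Int :=
  data.foldl (fun r L => max (max r L.1.2) L.2.2) 0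

-- the grid of values f x y, x = 0..W-1 inside each row, y = 0..H-1 over rows
def pvMkGrid (W H : Int) (f : Int → Int → Int) : List (List Int) :=
  (PySem.List.pyRange 0 H 1).map (fun y => (PySem.List.pyRange 0 W 1).map (fun x => f x y))

-- how often a vertical / horizontal segment covers cell (x, y), as A plots it
def pvCovV (L : (Int × Int) × (Int × Int)) (x y : Int) : Int :=
  if L.1.1 = L.2.1 ∧ x = L.1.1 ∧ min L.1.2 L.2.2 ≤ y ∧ y ≤ max L.1.2 L.2.2 then 1 else 0
def pvCovH (L : (Int × Int) × (Int × Int)) (x y : Int) : Int :=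
  if ¬ L.1.1 = L.2.1 ∧ L.1.2 = L.2.2 ∧ y = L.1.2 ∧ min L.1.1 L.2.1 ≤ x ∧ x ≤ max L.1.1 L.2.1 then 1 else 0
def pvCnt (data : List ((Int × Int) × (Int × Int))) (x y : Int) : Int :=
  (data.map (fun L => pvCovV L x y + pvCovH L x y)).sum

-- per-segment difference-array contributions (B side)
def pvDV (L : (Int × Int) × (Int × Int)) (x j : Int) : Int :=
  (if L.1.1 = L.2.1 ∧ x = L.1.1 ∧ j = min L.1.2 L.2.2 then 1 else 0)
  - (if L.1.1 = L.2.1 ∧ x = L.1.1 ∧ j = max L.1.2 L.2.2 + 1 then 1 else 0)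
def pvDH (L : (Int × Int) × (Int × Int)) (y j : Int) : Int :=
  (if ¬ L.1.1 = L.2.1 ∧ L.1.2 = L.2.2 ∧ y = L.1.2 ∧ j = min L.1.1 L.2.1 then 1 else 0)
  - (if ¬ L.1.1 = L.2.1 ∧ L.1.2 = L.2.2 ∧ y = L.1.2 ∧ j = max L.1.1 L.2.1 + 1 then 1 else 0)
def pvRdf (data : List ((Int × Int) × (Int × Int))) (j y : Int) : Int :=
  (data.map (fun L => pvDH L y j)).sum
def pvCdf (data : List ((Int × Int) × (Int × Int))) (j x : Int) : Int :=
  (data.map (fun L => pvDV L x j)).sum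

theorem pvSetMap {α : Type} (f : Int → α) (n i : Int) (v : α) (h0 : 0 ≤ i) (_hn : i < n) :
    PySem.List.pySetD ((PySem.List.pyRange 0 n 1).map f) i v
      = (PySem.List.pyRange 0 n 1).map (fun j => if j = i then v else f j) := by
  rw [PySem.List.pySetD_of_nonneg _ v h0]
  apply List.ext_getElem
  · simp
  · intro k hk1 hk2
    simp only [List.getElem_set, List.getElem_map, PySem.List.getElem_pyRange_one]
    rcases eq_or_ne k i.toNat with h | h
    · simp only [h]
      have h3 : ((0 : Int) + (i.toNat : Int)) = i := by omega
      simp only [h3]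
    · have h2 : ¬ ((0 : Int) + (k : Int) = i) := by omega
      simp only [Ne.symm h, if_neg h2]
      simp

theorem pvGetMap {α : Type} (f : Int → α) (n i : Int) (d : α) (h0 : 0 ≤ i) (hn : i < n) :
    PySem.List.pyGetD ((PySem.List.pyRange 0 n 1).map f) i d = f i :=
  PySem.List.pyGetD_map_pyRange_of_nonneg f n i d h0 hn

theorem pvMkGrid_congr {W H : Int} {f g : Int → Int → Int}
    (h : ∀ x y, 0 ≤ x → x < W → 0 ≤ y → y < H → f x y = g x y) :
    pvMkGrid W H f = pvMkGrid W H g := by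
  unfold pvMkGrid
  apply List.map_congr_left
  intro y hy
  apply List.map_congr_left
  intro x hx
  rw [PySem.List.mem_pyRange_one] at hy hx
  exact h x y hx.1 hx.2 hy.1 hy.2

-- arr[i][j] += d on a nested list (proof-side helper; A's pvGridInc is this with d = 1)
def pvInc2 (arr : List (List Int)) (i j d : Int) : List (List Int) :=
  let row := PySem.List.pyGetD arr i []
  PySem.List.pySetD arr i (PySem.List.pySetD row j (PySem.List.pyGetD row j 0 + d))

theorem pvInc2_mkGrid (W H : Int) (f : Int → Int → Int) (y x d : Int)
    (hx0 : 0 ≤ x) (hxW : x < W) (hy0 : 0 ≤ y) (hyH : y < H) :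
    pvInc2 (pvMkGrid W H f) y x d
      = pvMkGrid W H (fun x' y' => if x' = x ∧ y' = y then f x' y' + d else f x' y') := by
  unfold pvInc2
  simp only []
  unfold pvMkGrid
  rw [pvGetMap _ H y [] hy0 hyH, pvGetMap _ W x 0 hx0 hxW,
      pvSetMap _ W x _ hx0 hxW, pvSetMap _ H y _ hy0 hyH]
  apply List.map_congr_left
  intro y' hy'
  rw [PySem.List.mem_pyRange_one] at hy'
  by_cases hyy : y' = y
  · simp only [hyy]
    apply List.map_congr_left
    intro x' hx'
    by_cases hxx : x' = x <;> simp [hxx]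
  · simp only [if_neg hyy]
    apply List.map_congr_left
    intro x' hx'
    simp [hyy]

theorem pvSortedPair (a b : Int) :
    PySem.List.sorted [a, b] (fun v => v) false = [min a b, max a b] := by
  apply PySem.List.sorted_id_eq_of_perm_of_pairwise
  · rcases le_total a b with h | h
    · simp [min_eq_left h, max_eq_right h]
    · simp only [min_eq_right h, max_eq_left h]
      exact List.Perm.swap a b []
  · simp

theorem pvFoldV (W H x b : Int) (hx0 : 0 ≤ x) (hxW : x < W) (hb : b < H) :
    ∀ (n : Nat) (lo : Int) (f : Int → Int → Int), 0 ≤ lo → n = (b + 1 - lo).toNat →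
    (PySem.List.pyRange lo (b + 1) 1).foldl (fun g y => pvInc2 g y x 1) (pvMkGrid W H f)
      = pvMkGrid W H (fun x' y' => f x' y' + if x' = x ∧ lo ≤ y' ∧ y' ≤ b then 1 else 0) := by
  intro n
  induction n with
  | zero =>
    intro lo f h0 hn
    rw [PySem.List.pyRange_one_eq_nil (by omega)]
    simp only [List.foldl_nil]
    apply pvMkGrid_congr
    intro x' y' _ _ _ _
    have : ¬ (x' = x ∧ lo ≤ y' ∧ y' ≤ b) := by
      rintro ⟨_, h1, h2⟩; omega
    simp [this]
  | succ n ih =>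
    intro lo f h0 hn
    have hlt : lo < b + 1 := by omega
    rw [PySem.List.pyRange_one_cons hlt, List.foldl_cons,
        pvInc2_mkGrid W H f lo x 1 hx0 hxW h0 (by omega),
        ih (lo + 1) _ (by omega) (by omega)]
    apply pvMkGrid_congr
    intro x' y' _ _ _ _
    split_ifs <;> omega

theorem pvFoldH (W H y b : Int) (hy0 : 0 ≤ y) (hyH : y < H) (hb : b < W) :
    ∀ (n : Nat) (lo : Int) (f : Int → Int → Int), 0 ≤ lo → n = (b + 1 - lo).toNat →
    (PySem.List.pyRange lo (b + 1) 1).foldl (fun g x => pvInc2 g y x 1) (pvMkGrid W H f)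
      = pvMkGrid W H (fun x' y' => f x' y' + if y' = y ∧ lo ≤ x' ∧ x' ≤ b then 1 else 0) := by
  intro n
  induction n with
  | zero =>
    intro lo f h0 hn
    rw [PySem.List.pyRange_one_eq_nil (by omega)]
    simp only [List.foldl_nil]
    apply pvMkGrid_congr
    intro x' y' _ _ _ _
    have : ¬ (y' = y ∧ lo ≤ x' ∧ x' ≤ b) := by
      rintro ⟨_, h1, h2⟩; omega
    simp [this]
  | succ n ih =>
    intro lo f h0 hn
    have hlt : lo < b + 1 := by omega
    rw [PySem.List.pyRange_one_cons hlt, List.foldl_cons,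
        pvInc2_mkGrid W H f y lo 1 (by omega) (by omega) hy0 hyH,
        ih (lo + 1) _ (by omega) (by omega)]
    apply pvMkGrid_congr
    intro x' y' _ _ _ _
    split_ifs <;> omega

theorem pvFoldMax_ge_init {β : Type} (g h : β → Int) (l : List β) :
    ∀ r : Int, r ≤ l.foldl (fun r L => max (max r (g L)) (h L)) r := by
  induction l with
  | nil => intro r; simp
  | cons L l ih =>
    intro r
    calc r ≤ max (max r (g L)) (h L) := by omega
    _ ≤ _ := by simpa using ih (max (max r (g L)) (h L))

theorem pvFoldMax_mem {β : Type} (g h : β → Int) (l : List β) :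
    ∀ (r : Int) (L : β), L ∈ l →
      g L ≤ l.foldl (fun r L => max (max r (g L)) (h L)) r ∧
      h L ≤ l.foldl (fun r L => max (max r (g L)) (h L)) r := by
  induction l with
  | nil => intro r L hL; cases hL
  | cons M l ih =>
    intro r L hL
    rcases List.mem_cons.mp hL with h1 | h1
    · subst h1
      have := pvFoldMax_ge_init g h l (max (max r (g L)) (h L))
      constructor <;> (simp only [List.foldl_cons]; omega)
    · simpa using ih (max (max r (g M)) (h M)) L h1

theorem pvFindMax0 (data : List ((Int × Int) × (Int × Int))) :
    find_max data 0 = pvMxX data + 1 := by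
  unfold find_max pvMxX
  have h : (fun (res : Int) (line : (Int × Int) × (Int × Int)) =>
      [line.1, line.2].foldl (fun res point =>
        if pvPointCoord point 0 > res then pvPointCoord point 0 else res) res)
      = (fun (r : Int) (L : (Int × Int) × (Int × Int)) => max (max r L.1.1) L.2.1) := by
    funext r L
    simp only [List.foldl_cons, List.foldl_nil, pvPointCoord, gt_iff_lt]
    split_ifs <;> omega
  rw [h]

theorem pvFindMax1 (data : List ((Int × Int) × (Int × Int))) :
    find_max data 1 = pvMxY data + 1 := by
  unfold find_max pvMxY
  have h : (fun (res : Int) (line : (Int × Int) × (Int × Int)) =>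
      [line.1, line.2].foldl (fun res point =>
        if pvPointCoord point 1 > res then pvPointCoord point 1 else res) res)
      = (fun (r : Int) (L : (Int × Int) × (Int × Int)) => max (max r L.1.2) L.2.2) := by
    funext r L
    simp only [List.foldl_cons, List.foldl_nil, pvPointCoord, gt_iff_lt]
    norm_num
    split_ifs <;> omega
  rw [h]

theorem pvAfold (W H : Int) (l : List ((Int × Int) × (Int × Int))) :
    ∀ f : Int → Int → Int,
    (∀ L ∈ l, L.1.1 < W ∧ L.2.1 < W ∧ L.1.2 < H ∧ L.2.2 < H ∧
      (L.1.1 = L.2.1 → 0 ≤ L.1.1 ∧ 0 ≤ L.2.1 ∧ 0 ≤ L.1.2 ∧ 0 ≤ L.2.2) ∧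
      (¬ L.1.1 = L.2.1 → L.1.2 = L.2.2 → 0 ≤ L.1.1 ∧ 0 ≤ L.2.1 ∧ 0 ≤ L.1.2 ∧ 0 ≤ L.2.2)) →
    l.foldl (fun grid line =>
      if line.1.1 = line.2.1 then
        let x := line.1.1
        let sorted_y := PySem.List.sorted [line.1.2, line.2.2] (fun v => v) false
        (PySem.List.pyRange (PySem.List.pyGetD sorted_y 0 0) (PySem.List.pyGetD sorted_y 1 0 + 1) 1).foldl
          (fun grid y => pvGridInc grid y x) grid
      else if line.1.2 = line.2.2 then
        let y := line.1.2
        let sorted_x := PySem.List.sorted [line.1.1, line.2.1] (fun v => v) false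
        (PySem.List.pyRange (PySem.List.pyGetD sorted_x 0 0) (PySem.List.pyGetD sorted_x 1 0 + 1) 1).foldl
          (fun grid x => pvGridInc grid y x) grid
      else grid) (pvMkGrid W H f)
      = pvMkGrid W H (fun x y => f x y + pvCnt l x y) := by
  induction l with
  | nil =>
    intro f _
    simp only [List.foldl_nil]
    apply pvMkGrid_congr
    intro x y _ _ _ _
    simp [pvCnt]
  | cons L l ih =>
    intro f hb
    obtain ⟨hx1W, hx2W, hy1H, hy2H, hnnV, hnnH⟩ := hb L (List.mem_cons_self)
    have hb' := fun M hM => hb M (List.mem_cons_of_mem L hM)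
    have hget1y : PySem.List.pyGetD [min L.1.2 L.2.2, max L.1.2 L.2.2] 1 0 = max L.1.2 L.2.2 := by
      simp [PySem.List.pyGetD, PySem.List.pyGet?, PySem.List.pyIdx?]
    have hget1x : PySem.List.pyGetD [min L.1.1 L.2.1, max L.1.1 L.2.1] 1 0 = max L.1.1 L.2.1 := by
      simp [PySem.List.pyGetD, PySem.List.pyGet?, PySem.List.pyIdx?]
    have hgi : (fun (grid : List (List Int)) (y : Int) => pvGridInc grid y L.1.1)
        = (fun grid y => pvInc2 grid y L.1.1 1) := rfl
    have hgi2 : (fun (grid : List (List Int)) (x : Int) => pvGridInc grid L.1.2 x)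
        = (fun grid x => pvInc2 grid L.1.2 x 1) := rfl
    have hstep : (if L.1.1 = L.2.1 then
        let x := L.1.1
        let sorted_y := PySem.List.sorted [L.1.2, L.2.2] (fun v => v) false
        (PySem.List.pyRange (PySem.List.pyGetD sorted_y 0 0) (PySem.List.pyGetD sorted_y 1 0 + 1) 1).foldl
          (fun grid y => pvGridInc grid y x) (pvMkGrid W H f)
      else if L.1.2 = L.2.2 then
        let y := L.1.2
        let sorted_x := PySem.List.sorted [L.1.1, L.2.1] (fun v => v) false
        (PySem.List.pyRange (PySem.List.pyGetD sorted_x 0 0) (PySem.List.pyGetD sorted_x 1 0 + 1) 1).foldl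
          (fun grid x => pvGridInc grid y x) (pvMkGrid W H f)
      else pvMkGrid W H f)
        = pvMkGrid W H (fun x' y' => f x' y' + (pvCovV L x' y' + pvCovH L x' y')) := by
      by_cases hv : L.1.1 = L.2.1
      · obtain ⟨ha1, ha2, ha3, ha4⟩ := hnnV hv
        simp only [if_pos hv, pvSortedPair, PySem.List.pyGetD_zero_cons, hget1y, hgi]
        rw [pvFoldV W H L.1.1 (max L.1.2 L.2.2) ha1 hx1W (by omega)
              (max L.1.2 L.2.2 + 1 - min L.1.2 L.2.2).toNat (min L.1.2 L.2.2) f (by omega) rfl]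
        apply pvMkGrid_congr
        intro x y _ _ _ _
        simp only [pvCovV, pvCovH]
        split_ifs <;> omega
      · simp only [if_neg hv]
        by_cases hh : L.1.2 = L.2.2
        · obtain ⟨ha1, ha2, ha3, ha4⟩ := hnnH hv hh
          simp only [if_pos hh, pvSortedPair, PySem.List.pyGetD_zero_cons, hget1x, hgi2]
          rw [pvFoldH W H L.1.2 (max L.1.1 L.2.1) ha3 hy1H (by omega)
                (max L.1.1 L.2.1 + 1 - min L.1.1 L.2.1).toNat (min L.1.1 L.2.1) f (by omega) rfl]
          apply pvMkGrid_congr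
          intro x y _ _ _ _
          simp only [pvCovV, pvCovH]
          split_ifs <;> omega
        · simp only [if_neg hh]
          apply pvMkGrid_congr
          intro x y _ _ _ _
          simp only [pvCovV, pvCovH]
          split_ifs <;> omega
    simp only [List.foldl_cons]
    rw [hstep, ih _ hb']
    apply pvMkGrid_congr
    intro x y _ _ _ _
    simp only [pvCnt, List.map_cons, List.sum_cons]
    omega

theorem pvBounds (data : List ((Int × Int) × (Int × Int))) (h : Pre_plot_lines data) :
    ∀ L ∈ data, L.1.1 < pvMxX data + 2 ∧ L.2.1 < pvMxX data + 2 ∧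
      L.1.2 < pvMxY data + 2 ∧ L.2.2 < pvMxY data + 2 ∧
      (L.1.1 = L.2.1 → 0 ≤ L.1.1 ∧ 0 ≤ L.2.1 ∧ 0 ≤ L.1.2 ∧ 0 ≤ L.2.2) ∧
      (¬ L.1.1 = L.2.1 → L.1.2 = L.2.2 → 0 ≤ L.1.1 ∧ 0 ≤ L.2.1 ∧ 0 ≤ L.1.2 ∧ 0 ≤ L.2.2) := by
  intro L hL
  have hx : L.1.1 ≤ pvMxX data ∧ L.2.1 ≤ pvMxX data := by
    unfold pvMxX; exact pvFoldMax_mem (fun L => L.1.1) (fun L => L.2.1) data 0 L hL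
  have hy : L.1.2 ≤ pvMxY data ∧ L.2.2 ≤ pvMxY data := by
    unfold pvMxY; exact pvFoldMax_mem (fun L => L.1.2) (fun L => L.2.2) data 0 L hL
  exact ⟨by omega, by omega, by omega, by omega, h L hL⟩

theorem pv_A_eq (data : List ((Int × Int) × (Int × Int))) (h : Pre_plot_lines data) :
    plot_lines data = pvMkGrid (pvMxX data + 2) (pvMxY data + 2) (pvCnt data) := by
  unfold plot_lines
  rw [pvFindMax0, pvFindMax1]
  have hgrid : create_empty_grid (pvMxX data + 1) (pvMxY data + 1)
      = pvMkGrid (pvMxX data + 2) (pvMxY data + 2) (fun _ _ => (0 : Int)) := by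
    unfold create_empty_grid pvMkGrid
    simp only [show pvMxX data + 1 + 1 = pvMxX data + 2 from by ring,
               show pvMxY data + 1 + 1 = pvMxY data + 2 from by ring]
  rw [hgrid, pvAfold _ _ data _ (pvBounds data h)]
  apply pvMkGrid_congr
  intro x y _ _ _ _
  omega

theorem pvSumMapSub (R : List Int) (f g : Int → Int) :
    (R.map (fun j => f j - g j)).sum = (R.map f).sum - (R.map g).sum := by
  induction R with
  | nil => simp
  | cons a R ih => simp [ih]; ring

theorem pvSumInd (c : Int) : ∀ (n : Nat),
    ((PySem.List.pyRange 0 (n : Int) 1).map (fun j => if j = c then (1 : Int) else 0)).sum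
      = if 0 ≤ c ∧ c < (n : Int) then 1 else 0 := by
  intro n
  induction n with
  | zero => simp
  | succ n ih =>
    rw [show ((n + 1 : Nat) : Int) = (n : Int) + 1 from by push_cast; ring,
        PySem.List.pyRange_one_succ_right (by positivity), List.map_append, List.sum_append, ih]
    simp only [List.map_cons, List.map_nil, List.sum_cons, List.sum_nil]
    split_ifs <;> omega

theorem pvSumComm {β : Type} (l : List β) (R : List Int) (g : β → Int → Int) :
    (R.map (fun j => (l.map (fun L => g L j)).sum)).sum
      = (l.map (fun L => (R.map (g L)).sum)).sum := by
  induction l with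
  | nil => simp
  | cons L l ih =>
    simp only [List.map_cons, List.sum_cons, ← ih]
    rw [← PySem.List.sum_map_add_int]

theorem pvScan2 (q e : Int → Int) : ∀ (n : Nat),
    (PySem.List.pyRange 0 (n : Int) 1).foldl
      (fun (s : Int × List Int) x => (s.1 + q x, s.2 ++ [s.1 + q x + e x])) ((0 : Int), ([] : List Int))
    = (((PySem.List.pyRange 0 (n : Int) 1).map q).sum,
       (PySem.List.pyRange 0 (n : Int) 1).map (fun x => ((PySem.List.pyRange 0 (x + 1) 1).map q).sum + e x)) := by
  intro n
  induction n with
  | zero => simp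
  | succ n ih =>
    have hR : PySem.List.pyRange 0 ((n : Int) + 1) 1
        = PySem.List.pyRange 0 (n : Int) 1 ++ [(n : Int)] :=
      PySem.List.pyRange_one_succ_right (by positivity)
    rw [show ((n + 1 : Nat) : Int) = (n : Int) + 1 from by push_cast; ring,
        hR, List.foldl_append, ih]
    simp only [List.foldl_cons, List.foldl_nil, List.map_append, List.sum_append,
      List.map_cons, List.map_nil, List.sum_cons, List.sum_nil, Prod.mk.injEq]
    refine ⟨by ring, ?_⟩
    congr 1
    rw [hR, List.map_append, List.sum_append]
    simp

theorem pvPrefDV (L : (Int × Int) × (Int × Int)) (x y : Int) (hy : 0 ≤ y)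
    (hc : L.1.1 = L.2.1 → 0 ≤ L.1.1 ∧ 0 ≤ L.2.1 ∧ 0 ≤ L.1.2 ∧ 0 ≤ L.2.2) :
    ((PySem.List.pyRange 0 (y + 1) 1).map (fun j => pvDV L x j)).sum = pvCovV L x y := by
  have hcast : (((y + 1).toNat : Nat) : Int) = y + 1 := by omega
  rw [← hcast]
  have hsub : ∀ j : Int, pvDV L x j
      = (if j = min L.1.2 L.2.2 ∧ L.1.1 = L.2.1 ∧ x = L.1.1 then (1 : Int) else 0)
        - (if j = max L.1.2 L.2.2 + 1 ∧ L.1.1 = L.2.1 ∧ x = L.1.1 then (1 : Int) else 0) := by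
    intro j
    simp only [pvDV]
    split_ifs <;> omega
  simp only [hsub]
  rw [pvSumMapSub]
  by_cases hvx : L.1.1 = L.2.1 ∧ x = L.1.1
  · obtain ⟨h1, h2, h3, h4⟩ := hc hvx.1
    simp only [hvx, and_true]
    rw [pvSumInd, pvSumInd]
    simp only [pvCovV, hvx.1, true_and]
    split_ifs <;> omega
  · have e1 : ∀ c : Int,
        ((PySem.List.pyRange 0 (((y + 1).toNat : Nat) : Int) 1).map
          (fun j => if j = c ∧ L.1.1 = L.2.1 ∧ x = L.1.1 then (1 : Int) else 0)).sum = 0 := by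
      intro c
      have : ∀ j ∈ PySem.List.pyRange 0 (((y + 1).toNat : Nat) : Int) 1,
          (if j = c ∧ L.1.1 = L.2.1 ∧ x = L.1.1 then (1 : Int) else 0) = 0 := by
        intro j _; split_ifs <;> omega
      rw [List.map_congr_left this]
      simp
    rw [e1, e1]
    simp only [pvCovV]
    split_ifs <;> omega

theorem pvPrefDH (L : (Int × Int) × (Int × Int)) (y x : Int) (hx : 0 ≤ x)
    (hc : ¬ L.1.1 = L.2.1 → L.1.2 = L.2.2 → 0 ≤ L.1.1 ∧ 0 ≤ L.2.1 ∧ 0 ≤ L.1.2 ∧ 0 ≤ L.2.2) :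
    ((PySem.List.pyRange 0 (x + 1) 1).map (fun j => pvDH L y j)).sum = pvCovH L x y := by
  have hcast : (((x + 1).toNat : Nat) : Int) = x + 1 := by omega
  rw [← hcast]
  have hsub : ∀ j : Int, pvDH L y j
      = (if j = min L.1.1 L.2.1 ∧ (¬ L.1.1 = L.2.1 ∧ L.1.2 = L.2.2 ∧ y = L.1.2) then (1 : Int) else 0)
        - (if j = max L.1.1 L.2.1 + 1 ∧ (¬ L.1.1 = L.2.1 ∧ L.1.2 = L.2.2 ∧ y = L.1.2) then (1 : Int) else 0) := by
    intro j
    simp only [pvDH]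
    split_ifs <;> omega
  simp only [hsub]
  rw [pvSumMapSub]
  by_cases hvx : ¬ L.1.1 = L.2.1 ∧ L.1.2 = L.2.2 ∧ y = L.1.2
  · obtain ⟨h1, h2, h3, h4⟩ := hc hvx.1 hvx.2.1
    obtain ⟨ha, hb2, hc2⟩ := hvx
    have htrue : (¬ L.1.1 = L.2.1 ∧ L.1.2 = L.2.2 ∧ y = L.1.2) = True := by
      simp [ha, hb2, hc2]
    simp only [htrue, and_true]
    rw [pvSumInd, pvSumInd]
    simp only [pvCovH]
    split_ifs <;> omega
  · have e1 : ∀ c : Int,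
        ((PySem.List.pyRange 0 (((x + 1).toNat : Nat) : Int) 1).map
          (fun j => if j = c ∧ (¬ L.1.1 = L.2.1 ∧ L.1.2 = L.2.2 ∧ y = L.1.2) then (1 : Int) else 0)).sum = 0 := by
      intro c
      have : ∀ j ∈ PySem.List.pyRange 0 (((x + 1).toNat : Nat) : Int) 1,
          (if j = c ∧ (¬ L.1.1 = L.2.1 ∧ L.1.2 = L.2.2 ∧ y = L.1.2) then (1 : Int) else 0) = 0 := by
        intro j _
        split_ifs with hc
        · exact absurd hc.2 hvx
        · rfl
      rw [List.map_congr_left this]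
      simp
    rw [e1, e1]
    simp only [pvCovH]
    split_ifs with hc
    · exact absurd ⟨hc.1, hc.2.1, hc.2.2.1⟩ hvx
    · rfl

theorem pvRepl (n : Int) (c : Int) :
    List.replicate n.toNat c = (PySem.List.pyRange 0 n 1).map (fun _ => c) := by
  rw [List.map_const', PySem.List.length_pyRange_one]
  norm_num

theorem pvScan2I (q e : Int → Int) (n : Int) (hn : 0 ≤ n) :
    (PySem.List.pyRange 0 n 1).foldl
      (fun (s : Int × List Int) x => (s.1 + q x, s.2 ++ [s.1 + q x + e x])) ((0 : Int), ([] : List Int))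
    = (((PySem.List.pyRange 0 n 1).map q).sum,
       (PySem.List.pyRange 0 n 1).map (fun x => ((PySem.List.pyRange 0 (x + 1) 1).map q).sum + e x)) := by
  have h := pvScan2 q e n.toNat
  rwa [show ((n.toNat : Nat) : Int) = n from by omega] at h

-- ===== B-side machinery: dict characterizations, events, sweep =====

theorem pvGet?_eq_of {κ ν : Type} [BEq κ] [LawfulBEq κ] (d : PySem.Dict κ ν) (k : κ) (d0 : ν) :
    d.get? k = if d.contains k then some (d.getD k d0) else none := by
  rcases h : d.get? k with _ | v
  · simp [PySem.Dict.contains_eq_isSome_get?, h]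
  · simp [PySem.Dict.contains_eq_isSome_get?, h, PySem.Dict.getD_of_get?_eq_some d d0 h]

theorem pvGet?_modify {κ ν : Type} [BEq κ] [LawfulBEq κ] [DecidableEq κ]
    (d : PySem.Dict κ ν) (k k' : κ) (d0 : ν) (f : ν → ν) :
    (d.modify k d0 f).get? k' = if k' = k then some (f (d.getD k d0)) else d.get? k' := by
  rw [pvGet?_eq_of (d.modify k d0 f) k' d0, PySem.Dict.contains_modify, PySem.Dict.getD_modify]
  by_cases hk : k' = k
  · simp [hk]
  · have hb : (k' == k) = false := by simp [hk]
    rw [hb, Bool.false_or, if_neg hk, ← pvGet?_eq_of d k' d0]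
    simp [hk]

-- the vertical-segment events B records for row y, in processing order
def pvEvents (l : List ((Int × Int) × (Int × Int))) (y : Int) : List (Int × Int) :=
  l.flatMap (fun L =>
    (if L.1.1 = L.2.1 ∧ y = min L.1.2 L.2.2 then [(L.1.1, (1 : Int))] else []) ++
    (if L.1.1 = L.2.1 ∧ y = max L.1.2 L.2.2 + 1 then [(L.1.1, (-1 : Int))] else []))

def pvEvSum (ev : List (Int × Int)) (x : Int) : Int :=
  (ev.map (fun p => if p.1 = x then p.2 else 0)).sum

def pvHasHor (l : List ((Int × Int) × (Int × Int))) (y : Int) : Bool :=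
  l.any (fun L => decide (¬ L.1.1 = L.2.1 ∧ L.1.2 = L.2.2 ∧ L.1.2 = y))

theorem pvRdf_zero_of_not_hasHor (l : List ((Int × Int) × (Int × Int))) (y j : Int)
    (h : pvHasHor l y = false) : pvRdf l j y = 0 := by
  unfold pvRdf
  have : ∀ L ∈ l, pvDH L y j = 0 := by
    intro L hL
    have h2 := List.any_eq_false.mp h L hL
    simp only [decide_eq_true_eq] at h2
    unfold pvDH
    split_ifs <;> omega
  rw [List.map_congr_left (fun L hL => this L hL)]
  simp

theorem pvCovH_zero_of_not_hasHor (l : List ((Int × Int) × (Int × Int))) (y x : Int)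
    (h : pvHasHor l y = false) : (l.map (fun L => pvCovH L x y)).sum = 0 := by
  have : ∀ L ∈ l, pvCovH L x y = 0 := by
    intro L hL
    have h2 := List.any_eq_false.mp h L hL
    simp only [decide_eq_true_eq] at h2
    unfold pvCovH
    split_ifs <;> omega
  rw [List.map_congr_left (fun L hL => this L hL)]
  simp

theorem pvEvSum_append (ev ev' : List (Int × Int)) (x : Int) :
    pvEvSum (ev ++ ev') x = pvEvSum ev x + pvEvSum ev' x := by
  unfold pvEvSum
  rw [List.map_append, List.sum_append]

theorem pvEvSum_eq_pvCdf (l : List ((Int × Int) × (Int × Int))) (y x : Int) :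
    pvEvSum (pvEvents l y) x = pvCdf l y x := by
  induction l with
  | nil => simp [pvEvents, pvEvSum, pvCdf]
  | cons L l ih =>
    have hflat : pvEvents (L :: l) y
        = ((if L.1.1 = L.2.1 ∧ y = min L.1.2 L.2.2 then [(L.1.1, (1 : Int))] else []) ++
           (if L.1.1 = L.2.1 ∧ y = max L.1.2 L.2.2 + 1 then [(L.1.1, (-1 : Int))] else [])) ++
          pvEvents l y := by
      simp [pvEvents]
    rw [hflat, pvEvSum_append, pvEvSum_append, ih]
    have h1 : pvEvSum (if L.1.1 = L.2.1 ∧ y = min L.1.2 L.2.2 then [(L.1.1, (1 : Int))] else []) x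
        + pvEvSum (if L.1.1 = L.2.1 ∧ y = max L.1.2 L.2.2 + 1 then [(L.1.1, (-1 : Int))] else []) x
        = pvDV L x y := by
      unfold pvEvSum pvDV
      split_ifs <;> simp_all <;> omega
    rw [add_assoc] at *
    unfold pvCdf
    simp only [List.map_cons, List.sum_cons]
    unfold pvCdf at *
    omega

theorem pvEventsBounds (W H : Int) (l : List ((Int × Int) × (Int × Int)))
    (hb : ∀ L ∈ l, L.1.1 < W ∧ L.2.1 < W ∧ L.1.2 < H ∧ L.2.2 < H ∧
      (L.1.1 = L.2.1 → 0 ≤ L.1.1 ∧ 0 ≤ L.2.1 ∧ 0 ≤ L.1.2 ∧ 0 ≤ L.2.2) ∧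
      (¬ L.1.1 = L.2.1 → L.1.2 = L.2.2 → 0 ≤ L.1.1 ∧ 0 ≤ L.2.1 ∧ 0 ≤ L.1.2 ∧ 0 ≤ L.2.2))
    (y : Int) : ∀ p ∈ pvEvents l y, 0 ≤ p.1 ∧ p.1 < W := by
  intro p hp
  unfold pvEvents at hp
  rw [List.mem_flatMap] at hp
  obtain ⟨L, hL, hpin⟩ := hp
  obtain ⟨h1, _, _, _, hV, _⟩ := hb L hL
  rw [List.mem_append] at hpin
  rcases hpin with hin | hin <;>
  · split_ifs at hin with hc
    · rcases List.mem_singleton.mp hin with rfl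
      have := hV hc.1
      simp only
      omega
    · cases hin

theorem pvApplyEvents (W : Int) : ∀ (ev : List (Int × Int)),
    (∀ p ∈ ev, 0 ≤ p.1 ∧ p.1 < W) → ∀ (f : Int → Int),
    ev.foldl (fun ca p => PySem.List.pySetD ca p.1 (PySem.List.pyGetD ca p.1 0 + p.2))
      ((PySem.List.pyRange 0 W 1).map f)
    = (PySem.List.pyRange 0 W 1).map (fun x => f x + pvEvSum ev x) := by
  intro ev
  induction ev with
  | nil =>
    intro _ f
    simp only [List.foldl_nil]
    apply List.map_congr_left
    intro x _
    simp [pvEvSum]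
  | cons p ev ih =>
    intro hbp f
    obtain ⟨hp0, hpW⟩ := hbp p (List.mem_cons_self)
    rw [List.foldl_cons, pvGetMap f W p.1 0 hp0 hpW, pvSetMap f W p.1 _ hp0 hpW,
        show ((PySem.List.pyRange 0 W 1).map (fun j => if j = p.1 then f p.1 + p.2 else f j))
          = (PySem.List.pyRange 0 W 1).map (fun j => (if j = p.1 then f p.1 + p.2 else f j)) from rfl,
        ih (fun q hq => hbp q (List.mem_cons_of_mem p hq)) _]
    apply List.map_congr_left
    intro x _
    simp only [pvEvSum, List.map_cons, List.sum_cons]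
    by_cases hx : x = p.1
    · subst hx
      rw [if_pos rfl, if_pos rfl]
      omega
    · rw [if_neg hx, if_neg (fun hc => hx hc.symm)]
      omega

-- fill-loop characterization: rowdiff rows and colev event lists
theorem pvHasHor_append (l : List ((Int × Int) × (Int × Int))) (L : (Int × Int) × (Int × Int)) (y : Int) :
    pvHasHor (l ++ [L]) y
      = (pvHasHor l y || decide (¬ L.1.1 = L.2.1 ∧ L.1.2 = L.2.2 ∧ L.1.2 = y)) := by
  unfold pvHasHor
  rw [List.any_append]
  simp

theorem pvRdf_append (l : List ((Int × Int) × (Int × Int))) (L : (Int × Int) × (Int × Int)) (j y : Int) :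
    pvRdf (l ++ [L]) j y = pvRdf l j y + pvDH L y j := by
  unfold pvRdf
  rw [List.map_append, List.sum_append]
  simp

theorem pvEvents_append (l : List ((Int × Int) × (Int × Int))) (L : (Int × Int) × (Int × Int)) (y : Int) :
    pvEvents (l ++ [L]) y = pvEvents l y ++
      ((if L.1.1 = L.2.1 ∧ y = min L.1.2 L.2.2 then [(L.1.1, (1 : Int))] else []) ++
       (if L.1.1 = L.2.1 ∧ y = max L.1.2 L.2.2 + 1 then [(L.1.1, (-1 : Int))] else [])) := by
  unfold pvEvents
  rw [List.flatMap_append]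
  simp

theorem pvFillSpec (w H : Int) : ∀ (l : List ((Int × Int) × (Int × Int))),
    (∀ L ∈ l, L.1.1 < w ∧ L.2.1 < w ∧ L.1.2 < H ∧ L.2.2 < H ∧
      (L.1.1 = L.2.1 → 0 ≤ L.1.1 ∧ 0 ≤ L.2.1 ∧ 0 ≤ L.1.2 ∧ 0 ≤ L.2.2) ∧
      (¬ L.1.1 = L.2.1 → L.1.2 = L.2.2 → 0 ≤ L.1.1 ∧ 0 ≤ L.2.1 ∧ 0 ≤ L.1.2 ∧ 0 ≤ L.2.2)) →
    ∀ y : Int,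
    ((l.foldl (fun (rc : PySem.Dict Int (List Int) × PySem.Dict Int (List (Int × Int))) line =>
      if line.1.1 = line.2.1 then
        let a := min line.1.2 line.2.2
        let b := max line.1.2 line.2.2
        (rc.1, (rc.2.modify a [] (· ++ [(line.1.1, (1 : Int))])).modify (b + 1) []
          (· ++ [(line.1.1, (-1 : Int))]))
      else if line.1.2 = line.2.2 then
        let a := min line.1.1 line.2.1
        let b := max line.1.1 line.2.1
        (rc.1.modify line.1.2 (List.replicate (w + 1).toNat 0) (fun d =>
          let d1 := PySem.List.pySetD d a (PySem.List.pyGetD d a 0 + 1)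
          PySem.List.pySetD d1 (b + 1) (PySem.List.pyGetD d1 (b + 1) 0 + (-1))), rc.2)
      else rc) (PySem.Dict.empty, PySem.Dict.empty)).1.get? y
        = if pvHasHor l y then
            some ((PySem.List.pyRange 0 (w + 1) 1).map (fun j => pvRdf l j y)) else none) ∧
    ((l.foldl (fun (rc : PySem.Dict Int (List Int) × PySem.Dict Int (List (Int × Int))) line =>
      if line.1.1 = line.2.1 then
        let a := min line.1.2 line.2.2
        let b := max line.1.2 line.2.2
        (rc.1, (rc.2.modify a [] (· ++ [(line.1.1, (1 : Int))])).modify (b + 1) []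
          (· ++ [(line.1.1, (-1 : Int))]))
      else if line.1.2 = line.2.2 then
        let a := min line.1.1 line.2.1
        let b := max line.1.1 line.2.1
        (rc.1.modify line.1.2 (List.replicate (w + 1).toNat 0) (fun d =>
          let d1 := PySem.List.pySetD d a (PySem.List.pyGetD d a 0 + 1)
          PySem.List.pySetD d1 (b + 1) (PySem.List.pyGetD d1 (b + 1) 0 + (-1))), rc.2)
      else rc) (PySem.Dict.empty, PySem.Dict.empty)).2.getD y []
        = pvEvents l y) := by
  intro l
  induction l using List.reverseRecOn with
  | nil =>
    intro _ y
    constructor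
    · simp [pvHasHor, PySem.Dict.get?_empty]
    · simp [pvEvents, PySem.Dict.getD_empty]
  | append_singleton l L ih =>
    intro hb y
    have hbl := fun M hM => hb M (List.mem_append_left _ hM)
    have hbL := hb L (List.mem_append_right _ (List.mem_singleton_self L))
    rw [List.foldl_append, List.foldl_cons, List.foldl_nil]
    by_cases hv : L.1.1 = L.2.1
    · -- vertical: rowdiff unchanged, two event appends
      simp only [if_pos hv]
      constructor
      · rw [(ih hbl y).1, pvHasHor_append]
        have hpred : decide (¬ L.1.1 = L.2.1 ∧ L.1.2 = L.2.2 ∧ L.1.2 = y) = false := by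
          simp [hv]
        rw [hpred, Bool.or_false]
        by_cases hH : pvHasHor l y
        · rw [if_pos hH, if_pos hH]
          congr 1
          apply List.map_congr_left
          intro j _
          rw [pvRdf_append]
          have : pvDH L y j = 0 := by unfold pvDH; split_ifs <;> omega
          omega
        · rw [if_neg hH, if_neg hH]
      · rw [PySem.Dict.getD_modify, pvEvents_append]
        by_cases h1 : y = max L.1.2 L.2.2 + 1
        · rw [if_pos h1, PySem.Dict.getD_modify,
              if_neg (by omega : ¬ (max L.1.2 L.2.2 + 1 = min L.1.2 L.2.2)),
              (ih hbl _).2, if_neg (by rintro ⟨_, hc⟩; omega), if_pos ⟨hv, h1⟩, h1]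
          simp
        · rw [if_neg h1, PySem.Dict.getD_modify]
          by_cases h2 : y = min L.1.2 L.2.2
          · rw [if_pos h2, (ih hbl _).2, if_pos ⟨hv, h2⟩,
                if_neg (by rintro ⟨_, hc⟩; exact h1 hc), h2]
            simp
          · rw [if_neg h2, (ih hbl y).2,
                if_neg (by rintro ⟨_, hc⟩; exact h2 hc),
                if_neg (by rintro ⟨_, hc⟩; exact h1 hc)]
            simp
    · simp only [if_neg hv]
      by_cases hh : L.1.2 = L.2.2
      · -- horizontal: colev unchanged, one rowdiff modify
        simp only [if_pos hh]
        obtain ⟨ha1, ha2, ha3, ha4⟩ := (hb L (List.mem_append_right _ (List.mem_singleton_self L))).2.2.2.2.2 hv hh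
        obtain ⟨hw1, hw2, _, _, _, _⟩ := hbL
        constructor
        · rw [pvGet?_modify, pvHasHor_append]
          by_cases hy : y = L.1.2
          · rw [if_pos hy]
            have hpred : decide (¬ L.1.1 = L.2.1 ∧ L.1.2 = L.2.2 ∧ L.1.2 = y) = true := by
              subst hy; simp [hv, hh]
            rw [hpred, Bool.or_true, if_pos rfl]
            have hgetD : (l.foldl (fun (rc : PySem.Dict Int (List Int) × PySem.Dict Int (List (Int × Int))) line =>
                if line.1.1 = line.2.1 then
                  let a := min line.1.2 line.2.2
                  let b := max line.1.2 line.2.2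
                  (rc.1, (rc.2.modify a [] (· ++ [(line.1.1, (1 : Int))])).modify (b + 1) []
                    (· ++ [(line.1.1, (-1 : Int))]))
                else if line.1.2 = line.2.2 then
                  let a := min line.1.1 line.2.1
                  let b := max line.1.1 line.2.1
                  (rc.1.modify line.1.2 (List.replicate (w + 1).toNat 0) (fun d =>
                    let d1 := PySem.List.pySetD d a (PySem.List.pyGetD d a 0 + 1)
                    PySem.List.pySetD d1 (b + 1) (PySem.List.pyGetD d1 (b + 1) 0 + (-1))), rc.2)
                else rc) (PySem.Dict.empty, PySem.Dict.empty)).1.getD L.1.2 (List.replicate (w + 1).toNat 0)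
                = (PySem.List.pyRange 0 (w + 1) 1).map (fun j => pvRdf l j L.1.2) := by
              by_cases hH : pvHasHor l L.1.2
              · exact PySem.Dict.getD_of_get?_eq_some _ _ (by rw [(ih hbl L.1.2).1, if_pos hH])
              · rw [PySem.Dict.getD_of_get?_eq_none _ _ (by rw [(ih hbl L.1.2).1, if_neg hH]), pvRepl]
                apply List.map_congr_left
                intro j _
                rw [pvRdf_zero_of_not_hasHor l L.1.2 j (by simpa using hH)]
            rw [hgetD]
            rw [pvGetMap _ (w + 1) (min L.1.1 L.2.1) 0 (by omega) (by omega),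
                pvSetMap _ (w + 1) (min L.1.1 L.2.1) _ (by omega) (by omega),
                pvGetMap _ (w + 1) (max L.1.1 L.2.1 + 1) 0 (by omega) (by omega),
                pvSetMap _ (w + 1) (max L.1.1 L.2.1 + 1) _ (by omega) (by omega)]
            subst hy
            congr 1
            apply List.map_congr_left
            intro j _
            rw [pvRdf_append]
            unfold pvDH
            split_ifs <;> (try omega) <;> (subst_vars; omega)
          · rw [if_neg hy, (ih hbl y).1]
            have hpred : decide (¬ L.1.1 = L.2.1 ∧ L.1.2 = L.2.2 ∧ L.1.2 = y) = false := by
              simp only [decide_eq_false_iff_not]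
              rintro ⟨_, _, hc⟩
              exact hy hc.symm
            rw [hpred, Bool.or_false]
            by_cases hH : pvHasHor l y
            · rw [if_pos hH, if_pos hH]
              congr 1
              apply List.map_congr_left
              intro j _
              rw [pvRdf_append]
              have : pvDH L y j = 0 := by
                unfold pvDH
                split_ifs <;> omega
              omega
            · rw [if_neg hH, if_neg hH]
        · rw [(ih hbl y).2, pvEvents_append]
          have e1 : (if L.1.1 = L.2.1 ∧ y = min L.1.2 L.2.2 then [(L.1.1, (1 : Int))] else [])
              = [] := by rw [if_neg]; rintro ⟨hc, _⟩; exact hv hc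
          have e2 : (if L.1.1 = L.2.1 ∧ y = max L.1.2 L.2.2 + 1 then [(L.1.1, (-1 : Int))] else [])
              = [] := by rw [if_neg]; rintro ⟨hc, _⟩; exact hv hc
          rw [e1, e2, List.append_nil, List.append_nil]
      · -- diagonal: nothing happens
        simp only [if_neg hh]
        constructor
        · rw [(ih hbl y).1, pvHasHor_append]
          have hpred : decide (¬ L.1.1 = L.2.1 ∧ L.1.2 = L.2.2 ∧ L.1.2 = y) = false := by
            simp [hh]
          rw [hpred, Bool.or_false]
          by_cases hH : pvHasHor l y
          · rw [if_pos hH, if_pos hH]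
            congr 1
            apply List.map_congr_left
            intro j _
            rw [pvRdf_append]
            have : pvDH L y j = 0 := by unfold pvDH; split_ifs <;> omega
            omega
          · rw [if_neg hH, if_neg hH]
        · rw [(ih hbl y).2, pvEvents_append]
          have e1 : (if L.1.1 = L.2.1 ∧ y = min L.1.2 L.2.2 then [(L.1.1, (1 : Int))] else [])
              = [] := by rw [if_neg]; rintro ⟨hc, _⟩; exact hv hc
          have e2 : (if L.1.1 = L.2.1 ∧ y = max L.1.2 L.2.2 + 1 then [(L.1.1, (-1 : Int))] else [])
              = [] := by rw [if_neg]; rintro ⟨hc, _⟩; exact hv hc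
          rw [e1, e2, List.append_nil, List.append_nil]


theorem pvPairFold (l : List ((Int × Int) × (Int × Int))) : ∀ p : Int × Int,
    l.foldl (fun (p : Int × Int) L => (max (max p.1 L.1.1) L.2.1, max (max p.2 L.1.2) L.2.2)) p
      = (l.foldl (fun r L => max (max r L.1.1) L.2.1) p.1,
         l.foldl (fun r L => max (max r L.1.2) L.2.2) p.2) := by
  induction l with
  | nil => intro p; rfl
  | cons L l ih => intro p; simp only [List.foldl_cons, ih]

theorem pvMxX_nonneg (data : List ((Int × Int) × (Int × Int))) : 0 ≤ pvMxX data := by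
  unfold pvMxX; exact pvFoldMax_ge_init (fun L => L.1.1) (fun L => L.2.1) data 0

theorem pvMxY_nonneg (data : List ((Int × Int) × (Int × Int))) : 0 ≤ pvMxY data := by
  unfold pvMxY; exact pvFoldMax_ge_init (fun L => L.1.2) (fun L => L.2.2) data 0

-- the running column accumulator before processing row y
def pvColAcc (data : List ((Int × Int) × (Int × Int))) (y : Int) : List Int :=
  (PySem.List.pyRange 0 (pvMxX data + 2) 1).map
    (fun x => ((PySem.List.pyRange 0 y 1).map (fun j => pvCdf data j x)).sum)

-- row y of the final grid
def pvRow (data : List ((Int × Int) × (Int × Int))) (y : Int) : List Int :=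
  (PySem.List.pyRange 0 (pvMxX data + 2) 1).map (fun x => pvCnt data x y)

theorem pvColAcc_zero (data : List ((Int × Int) × (Int × Int))) :
    List.replicate (pvMxX data + 2).toNat (0 : Int) = pvColAcc data 0 := by
  rw [pvRepl]
  unfold pvColAcc
  apply List.map_congr_left
  intro x _
  rw [PySem.List.pyRange_one_eq_nil le_rfl]
  simp

theorem pvColAcc_entry (data : List ((Int × Int) × (Int × Int))) (hpre : Pre_plot_lines data)
    (x y : Int) (hy : 0 ≤ y) :
    ((PySem.List.pyRange 0 (y + 1) 1).map (fun j => pvCdf data j x)).sum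
      = (data.map (fun L => pvCovV L x y)).sum := by
  simp only [pvCdf]
  rw [pvSumComm data (PySem.List.pyRange 0 (y + 1) 1) (fun L j => pvDV L x j)]
  apply congrArg
  apply List.map_congr_left
  intro L hL
  exact pvPrefDV L x y hy (hpre L hL).1

theorem pvPrefRdf (data : List ((Int × Int) × (Int × Int))) (hpre : Pre_plot_lines data)
    (x y : Int) (hx : 0 ≤ x) :
    ((PySem.List.pyRange 0 (x + 1) 1).map (fun j => pvRdf data j y)).sum
      = (data.map (fun L => pvCovH L x y)).sum := by
  simp only [pvRdf]
  rw [pvSumComm data (PySem.List.pyRange 0 (x + 1) 1) (fun L j => pvDH L y j)]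
  apply congrArg
  apply List.map_congr_left
  intro L hL
  exact pvPrefDH L y x hx (hpre L hL).2

theorem pvCnt_split (data : List ((Int × Int) × (Int × Int))) (x y : Int) :
    pvCnt data x y = (data.map (fun L => pvCovV L x y)).sum
      + (data.map (fun L => pvCovH L x y)).sum := by
  unfold pvCnt
  rw [← PySem.List.sum_map_add_int]

theorem pvStepCol (data : List ((Int × Int) × (Int × Int))) (hpre : Pre_plot_lines data)
    (y : Int) (hy : 0 ≤ y) :
    (pvEvents data y).foldl (fun ca p =>
        PySem.List.pySetD ca p.1 (PySem.List.pyGetD ca p.1 0 + p.2)) (pvColAcc data y)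
      = pvColAcc data (y + 1) := by
  unfold pvColAcc
  rw [pvApplyEvents (pvMxX data + 2) (pvEvents data y)
        (pvEventsBounds (pvMxX data + 2) (pvMxY data + 2) data (pvBounds data hpre) y) _]
  apply List.map_congr_left
  intro x _
  rw [pvEvSum_eq_pvCdf, PySem.List.pyRange_one_succ_right hy, List.map_append, List.sum_append]
  simp

theorem pvRowNoHor (data : List ((Int × Int) × (Int × Int))) (hpre : Pre_plot_lines data)
    (y : Int) (hy : 0 ≤ y) (hH : pvHasHor data y = false) :
    pvColAcc data (y + 1) = pvRow data y := by
  unfold pvColAcc pvRow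
  apply List.map_congr_left
  intro x _
  rw [pvColAcc_entry data hpre x y hy, pvCnt_split, pvCovH_zero_of_not_hasHor data y x hH]
  omega

theorem pvRowHor (data : List ((Int × Int) × (Int × Int))) (hpre : Pre_plot_lines data)
    (y : Int) (hy : 0 ≤ y) :
    ((PySem.List.pyRange 0 (pvMxX data + 2) 1).foldl (fun (t : Int × List Int) x =>
        (t.1 + PySem.List.pyGetD ((PySem.List.pyRange 0 (pvMxX data + 2 + 1) 1).map
            (fun j => pvRdf data j y)) x 0,
         t.2 ++ [t.1 + PySem.List.pyGetD ((PySem.List.pyRange 0 (pvMxX data + 2 + 1) 1).map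
            (fun j => pvRdf data j y)) x 0
           + PySem.List.pyGetD (pvColAcc data (y + 1)) x 0])) ((0 : Int), ([] : List Int))).2
      = pvRow data y := by
  have hmx := pvMxX_nonneg data
  rw [pvScan2I (fun x => PySem.List.pyGetD ((PySem.List.pyRange 0 (pvMxX data + 2 + 1) 1).map
        (fun j => pvRdf data j y)) x 0)
      (fun x => PySem.List.pyGetD (pvColAcc data (y + 1)) x 0) (pvMxX data + 2) (by omega)]
  unfold pvRow
  apply List.map_congr_left
  intro x hx
  rw [PySem.List.mem_pyRange_one] at hx
  have hq : ∀ j ∈ PySem.List.pyRange 0 (x + 1) 1,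
      PySem.List.pyGetD ((PySem.List.pyRange 0 (pvMxX data + 2 + 1) 1).map
        (fun j => pvRdf data j y)) j 0 = pvRdf data j y := by
    intro j hj
    rw [PySem.List.mem_pyRange_one] at hj
    exact pvGetMap _ (pvMxX data + 2 + 1) j 0 hj.1 (by omega)
  rw [List.map_congr_left hq, pvPrefRdf data hpre x y hx.1]
  have he : PySem.List.pyGetD (pvColAcc data (y + 1)) x 0
      = (data.map (fun L => pvCovV L x y)).sum := by
    unfold pvColAcc
    rw [pvGetMap _ (pvMxX data + 2) x 0 hx.1 hx.2]
    exact pvColAcc_entry data hpre x y hy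
  rw [he, pvCnt_split]
  omega

theorem pvSweepG (data : List ((Int × Int) × (Int × Int))) (hpre : Pre_plot_lines data)
    (G1 : Int → Option (List Int)) (G2 : Int → List (Int × Int))
    (hG1 : ∀ y, G1 y = if pvHasHor data y then
        some ((PySem.List.pyRange 0 (pvMxX data + 2 + 1) 1).map (fun j => pvRdf data j y)) else none)
    (hG2 : ∀ y, G2 y = pvEvents data y) :
    ∀ (n : Nat) (y0 : Int) (g0 : List (List Int)), 0 ≤ y0 → y0 ≤ pvMxY data + 2 →
      n = (pvMxY data + 2 - y0).toNat →
    (PySem.List.pyRange y0 (pvMxY data + 2) 1).foldl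
      (fun (s : List Int × List (List Int)) y =>
        let colacc := (G2 y).foldl (fun ca p =>
          PySem.List.pySetD ca p.1 (PySem.List.pyGetD ca p.1 0 + p.2)) s.1
        match G1 y with
        | none => (colacc, s.2 ++ [colacc])
        | some rd =>
          (colacc, s.2 ++ [((PySem.List.pyRange 0 (pvMxX data + 2) 1).foldl
            (fun (t : Int × List Int) x =>
              let acc := t.1 + PySem.List.pyGetD rd x 0
              (acc, t.2 ++ [acc + PySem.List.pyGetD colacc x 0])) ((0 : Int), ([] : List Int))).2]))
      (pvColAcc data y0, g0)
    = (pvColAcc data (pvMxY data + 2),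
       g0 ++ (PySem.List.pyRange y0 (pvMxY data + 2) 1).map (fun y => pvRow data y)) := by
  intro n
  induction n with
  | zero =>
    intro y0 g0 hy0 hle hn
    have heq : y0 = pvMxY data + 2 := by omega
    subst heq
    rw [PySem.List.pyRange_one_eq_nil le_rfl]
    simp
  | succ n ih =>
    intro y0 g0 hy0 hle hn
    have hlt : y0 < pvMxY data + 2 := by omega
    rw [PySem.List.pyRange_one_cons hlt, List.foldl_cons, hG2 y0, hG1 y0]
    have hih := ih (y0 + 1) (g0 ++ [pvRow data y0]) (by omega) (by omega) (by omega)
    have hcat : (g0 ++ [pvRow data y0]) ++ (PySem.List.pyRange (y0 + 1) (pvMxY data + 2) 1).map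
        (fun y => pvRow data y)
        = g0 ++ (pvRow data y0 :: (PySem.List.pyRange (y0 + 1) (pvMxY data + 2) 1).map
          (fun y => pvRow data y)) := by
      rw [List.append_assoc]
      rfl
    by_cases hH : pvHasHor data y0
    · rw [if_pos hH]
      simp only []
      rw [pvStepCol data hpre y0 hy0, pvRowHor data hpre y0 hy0, List.map_cons]
      exact hih.trans (by rw [hcat])
    · rw [if_neg (by simpa using hH)]
      simp only []
      rw [pvStepCol data hpre y0 hy0]
      conv_lhs => rw [show g0 ++ [pvColAcc data (y0 + 1)] = g0 ++ [pvRow data y0] from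
        by rw [pvRowNoHor data hpre y0 hy0 (by simpa using hH)]]
      rw [List.map_cons]
      exact hih.trans (by rw [hcat])

theorem pv_B_eq (data : List ((Int × Int) × (Int × Int))) (h : Pre_plot_lines data) :
    plot_lines_alt data = pvMkGrid (pvMxX data + 2) (pvMxY data + 2) (pvCnt data) := by
  have hpair : data.foldl (fun (p : Int × Int) line =>
      (max (max p.1 line.1.1) line.2.1, max (max p.2 line.1.2) line.2.2)) (0, 0)
      = (pvMxX data, pvMxY data) := by
    rw [pvPairFold data (0, 0)]
    rfl
  have hfill := pvFillSpec (pvMxX data + 2) (pvMxY data + 2) data (pvBounds data h)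
  have hsw := pvSweepG data h _ _ (fun y => (hfill y).1) (fun y => (hfill y).2)
    (pvMxY data + 2).toNat 0 [] le_rfl (by have := pvMxY_nonneg data; omega) (by omega)
  have hfin : (PySem.List.pyRange 0 (pvMxY data + 2) 1).map (fun y => pvRow data y)
      = pvMkGrid (pvMxX data + 2) (pvMxY data + 2) (pvCnt data) := rfl
  unfold plot_lines_alt
  simp only [hpair]
  rw [pvColAcc_zero data]
  exact (congrArg Prod.snd hsw).trans hfin

-- ===== VERDICT (by name: the statement is the Claim_ definition above) =====
theorem plot_lines_spec : Claim_equal_plot_lines := by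
  intro data _hdom hpre
  unfold Spec_plot_lines
  rw [pv_A_eq data hpre, pv_B_eq data hpre]
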